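-- pv_equiv track=rewrite | github.com/yso009/1day-1solve | programmers/[1차] 비밀지도(P) .py | solution
-- ===== SOURCE A (Python) =====
-- def solution(n, arr1, arr2):
--     answer = []
--     for i,j in zip(arr1,arr2):
--         x = bin(i)[2:]
--         if n > len(bin(i)[2:]):
--             x = '0'*(n-len(bin(i)[2:])) + x
--         y = bin(j)[2:]
--         if n > len(bin(j)[2:]):
--             y = '0'*(n-len(bin(j)[2:])) + y
--         q = str(int(x)+int(y))
--         if n > len(q):
--             q = '0'*(n-len(q))+q
--         q = q.replace('0',' ')
--         q = q.replace('1','#')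
--         q = q.replace('2','#')
--         answer.append(q)
--     return answer
-- ===== SOURCE B (Python) =====
-- def solution(n, arr1, arr2):
--     table = str.maketrans("01", " #")
--     return [bin(a | b)[2:].zfill(n).translate(table) for a, b in zip(arr1, arr2)]
-- ===== Notes on version B (the rewrite author's own statement) =====
-- stated objective: simpler
-- what changed: B replaces A's decimal detour (building two zero-padded binary strings, re-reading them as base-10 ints, adding them, re-padding the decimal sum by hand, then three replace passes) with one integer bitwise OR per pair followed by bin()[2:].zfill(n).translate(); the parsing, the decimal addition and all three manual padding branches disappear.
import Mathlib
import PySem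

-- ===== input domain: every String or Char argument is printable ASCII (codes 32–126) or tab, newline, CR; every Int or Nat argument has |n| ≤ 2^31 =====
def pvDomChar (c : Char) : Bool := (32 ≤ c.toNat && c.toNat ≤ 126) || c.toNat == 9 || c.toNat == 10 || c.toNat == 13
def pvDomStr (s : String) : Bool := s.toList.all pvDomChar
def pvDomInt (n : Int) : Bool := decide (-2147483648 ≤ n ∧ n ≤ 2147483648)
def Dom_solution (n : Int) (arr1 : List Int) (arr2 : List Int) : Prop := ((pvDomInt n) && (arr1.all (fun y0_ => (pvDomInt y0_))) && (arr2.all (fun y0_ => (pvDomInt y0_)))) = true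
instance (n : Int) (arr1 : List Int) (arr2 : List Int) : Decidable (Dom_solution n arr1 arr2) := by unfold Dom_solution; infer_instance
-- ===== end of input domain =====

-- B replaces A's decimal detour (binary strings re-read as decimal ints, added, re-padded by hand)
-- with one integer bitwise OR per pair plus zfill/translate; return values proved equal on Pre_.

-- ===== PORT A =====

/-- `int(s)` as A applies it: in A every argument of `int` is a nonempty string of decimal
digits (`bin(·)[2:]` output plus `'0'` padding), and on such strings Python's `int` is exactly
this most-significant-first fold.  Hand-ported (exact on that domain) because the digit parser
inside `PySem.Int.ofChars?` is a private definition that proofs cannot unfold. -/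
def pyIntOfDigits : List Char → Nat → Nat
  | [], acc => acc
  | c :: t, acc => pyIntOfDigits t (acc * 10 + (c.toNat - 48))

/-- one iteration of A's loop body for the pair `(i, j)` -/
def solutionRow (n : Int) (i j : Int) : String :=
  let x0 := (PySem.Int.toBinChars0b i).drop 2        -- bin(i)[2:]  (slice [2:] = drop 2)
  let x  := if n > (x0.length : Int) then List.replicate ((n : Int) - (x0.length : Int)).toNat '0' ++ x0 else x0
  let y0 := (PySem.Int.toBinChars0b j).drop 2        -- bin(j)[2:]
  let y  := if n > (y0.length : Int) then List.replicate ((n : Int) - (y0.length : Int)).toNat '0' ++ y0 else y0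
  let q0 := PySem.Int.toChars ((pyIntOfDigits x 0 : Int) + (pyIntOfDigits y 0 : Int))   -- str(int(x)+int(y))
  let q1 := if n > (q0.length : Int) then List.replicate ((n : Int) - (q0.length : Int)).toNat '0' ++ q0 else q0
  let q2 := PySem.Chars.replace (PySem.Chars.replace (PySem.Chars.replace q1 ['0'] [' ']) ['1'] ['#']) ['2'] ['#']
  String.mk q2

def solution (n : Int) (arr1 : List Int) (arr2 : List Int) : List String :=
  (arr1.zip arr2).foldl (fun acc p => acc ++ [solutionRow n p.1 p.2]) []

-- ===== PORT B =====

/-- the translation table `str.maketrans("01", " #")` -/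
def pvTranslate (c : Char) : Char := if c = '0' then ' ' else if c = '1' then '#' else c

/-- `bin(a | b)[2:].zfill(n).translate(table)` -/
def solutionAltRow (n : Int) (p : Int × Int) : String :=
  String.mk ((PySem.Chars.zfill ((PySem.Int.toBinChars0b (PySem.Int.bor p.1 p.2)).drop 2) n).map pvTranslate)

def solution_alt (n : Int) (arr1 : List Int) (arr2 : List Int) : List String :=
  (arr1.zip arr2).map (solutionAltRow n)

-- ===== PRECONDITION & SPEC =====

/-- Excluded are only inputs on which A raises: whenever some zipped pair contains a negative
number, `bin(i)[2:]` keeps the `'b'` of `'-0b…'` and `int('…b…')` raises ValueError. -/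
def Pre_solution (n : Int) (arr1 : List Int) (arr2 : List Int) : Prop :=
  ∀ p ∈ arr1.zip arr2, 0 ≤ p.1 ∧ 0 ≤ p.2
instance (n : Int) (arr1 : List Int) (arr2 : List Int) : Decidable (Pre_solution n arr1 arr2) := by
  unfold Pre_solution; infer_instance

def pvWitness_solution : Int × List Int × List Int := (5, [9, 20, 28, 18, 11], [30, 1, 21, 17, 28])

def Spec_solution (n : Int) (arr1 : List Int) (arr2 : List Int) (out : List String) : Prop := out = solution_alt n arr1 arr2
instance (n : Int) (arr1 : List Int) (arr2 : List Int) (out : List String) : Decidable (Spec_solution n arr1 arr2 out) := by unfold Spec_solution; infer_instance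

-- ===== CLAIM (what is proved, stated in full; the proofs are below) =====
def Claim_equal_solution : Prop := ∀ (n : Int) (arr1 : List Int) (arr2 : List Int), Dom_solution n arr1 arr2 → Pre_solution n arr1 arr2 → Spec_solution n arr1 arr2 (solution n arr1 arr2)

-- ===== LEMMAS AND PROOFS =====

/-- digit value of a digit character -/
def charDigit (c : Char) : Nat := c.toNat - 48

/-- pointwise sum of two little-endian digit lists (shorter one padded with 0s) -/
def sum2 : List Nat → List Nat → List Nat
  | [], ys => ys
  | x :: xs, [] => x :: xs
  | x :: xs, y :: ys => (x + y) :: sum2 xs ys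

/-- pointwise OR of two little-endian digit lists (shorter one padded with 0s) -/
def or2 : List Nat → List Nat → List Nat
  | [], ys => ys
  | x :: xs, [] => x :: xs
  | x :: xs, y :: ys => (x ||| y) :: or2 xs ys

/-- net effect of A's replace chain on one character -/
def pvRepl (c : Char) : Char :=
  if c = '0' then ' ' else if c = '1' then '#' else if c = '2' then '#' else c

lemma length_sum2 (xs : List Nat) : ∀ ys, (sum2 xs ys).length = max xs.length ys.length := by
  induction xs with
  | nil => intro ys; simp [sum2]
  | cons x xs ih => intro ys; cases ys <;> simp [sum2, ih] <;> omega

lemma length_or2 (xs : List Nat) : ∀ ys, (or2 xs ys).length = max xs.length ys.length := by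
  induction xs with
  | nil => intro ys; simp [or2]
  | cons x xs ih => intro ys; cases ys <;> simp [or2, ih] <;> omega

lemma ofDigits_sum2 (xs : List Nat) : ∀ ys,
    Nat.ofDigits 10 (sum2 xs ys) = Nat.ofDigits 10 xs + Nat.ofDigits 10 ys := by
  induction xs with
  | nil => intro ys; simp [sum2]
  | cons x xs ih => intro ys; cases ys <;> simp [sum2, ih, Nat.ofDigits_cons] <;> ring

lemma or_mod_two (a b : Nat) : (a ||| b) % 2 = a % 2 ||| b % 2 := by
  have h1 := Nat.mod_two_eq_one_iff_testBit_zero (x := a)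
  have h2 := Nat.mod_two_eq_one_iff_testBit_zero (x := b)
  have h3 := Nat.mod_two_eq_one_iff_testBit_zero (x := a ||| b)
  have ho : (a ||| b).testBit 0 = (a.testBit 0 || b.testBit 0) := Nat.testBit_or a b 0
  rcases Nat.mod_two_eq_zero_or_one a with ha | ha <;> rcases Nat.mod_two_eq_zero_or_one b with hb | hb <;>
    rcases Nat.mod_two_eq_zero_or_one (a ||| b) with hab | hab <;>
    simp_all <;> omega

lemma digits_or (a : Nat) : ∀ b : Nat, Nat.digits 2 (a ||| b) = or2 (Nat.digits 2 a) (Nat.digits 2 b) := by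
  induction a using Nat.strong_induction_on with
  | _ a ih =>
    intro b
    by_cases ha : a = 0
    · subst ha; simp [or2]
    by_cases hb : b = 0
    · subst hb; simp [or2, Nat.digits_def' (by norm_num : (1:Nat) < 2) (Nat.pos_of_ne_zero ha)]
    have hab : a ||| b ≠ 0 := by intro h; exact ha (Nat.le_zero.mp (h ▸ Nat.left_le_or))
    rw [Nat.digits_def' (by norm_num : (1:Nat) < 2) (Nat.pos_of_ne_zero hab),
        Nat.digits_def' (by norm_num : (1:Nat) < 2) (Nat.pos_of_ne_zero ha),
        Nat.digits_def' (by norm_num : (1:Nat) < 2) (Nat.pos_of_ne_zero hb)]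
    simp only [or2]
    rw [or_mod_two, Nat.or_div_two, ih (a / 2) (Nat.div_lt_self (Nat.pos_of_ne_zero ha) one_lt_two)]

lemma toDigits_eq (b : Nat) (hb : 1 < b) (v : Nat) :
    Nat.toDigits b v = if v = 0 then ['0'] else ((Nat.digits b v).map Nat.digitChar).reverse := by
  induction v using Nat.strong_induction_on with
  | _ v ih =>
    rw [Nat.toDigits_eq_if hb]
    by_cases h0 : v = 0
    · subst h0; simp [show (0:Nat) < b by omega, Nat.digitChar]
    · by_cases hv : v < b
      · rw [if_pos hv, if_neg h0, Nat.digits_def' hb (Nat.pos_of_ne_zero h0)]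
        rw [Nat.mod_eq_of_lt hv, Nat.div_eq_of_lt hv]
        simp
      · rw [if_neg hv, if_neg h0]
        have hdiv : 0 < v / b := Nat.div_pos (le_of_not_gt hv) (by omega)
        rw [ih (v / b) (Nat.div_lt_self (Nat.pos_of_ne_zero h0) hb), if_neg (by omega)]
        rw [Nat.digits_def' hb (Nat.pos_of_ne_zero h0)]
        simp

lemma pyIntOfDigits_spec (cs : List Char) : ∀ acc : Nat,
    pyIntOfDigits cs acc = acc * 10 ^ cs.length + Nat.ofDigits 10 (cs.reverse.map charDigit) := by
  induction cs with
  | nil => intro acc; simp [pyIntOfDigits]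
  | cons c t ih =>
    intro acc
    simp only [pyIntOfDigits, ih, List.reverse_cons, List.map_append, List.map_cons, List.map_nil,
      Nat.ofDigits_append, List.length_cons, List.length_map, List.length_reverse, Nat.ofDigits_cons,
      Nat.ofDigits_nil, charDigit]
    ring

lemma ofDigits_append_zeros (l : List Nat) (k : Nat) :
    Nat.ofDigits 10 (l ++ List.replicate k 0) = Nat.ofDigits 10 l := by
  have h : (Nat.ofDigits 10 (List.replicate k 0) : Nat) = 0 := by
    induction k with
    | zero => simp
    | succ k ih => simp [List.replicate_succ, Nat.ofDigits_cons, ih]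
  simp [Nat.ofDigits_append, h]

lemma charDigit_digitChar (d : Nat) (h : d < 10) : charDigit d.digitChar = d := by
  interval_cases d <;> decide

lemma digitChar_ne_sign (d : Nat) (h : d < 10) : ¬(d.digitChar = '+' ∨ d.digitChar = '-') := by
  interval_cases d <;> decide

lemma replace_go_single (o n' : Char) (l : List Char) : ∀ (fuel : Nat) (acc : List Char),
    l.length ≤ fuel →
    PySem.Chars.replace.go [o] [n'] fuel l acc =
      acc.reverse ++ l.map (fun c => if c = o then n' else c) := by
  induction l with
  | nil =>
    intro fuel acc _
    cases fuel <;> simp [PySem.Chars.replace.go]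
  | cons c t ih =>
    intro fuel acc hf
    cases fuel with
    | zero => simp at hf
    | succ f =>
      simp only [PySem.Chars.replace.go]
      by_cases hc : c = o
      · subst hc
        rw [if_pos (by simp [List.isPrefixOf])]
        simp only [List.length_cons] at hf
        rw [show List.drop [c].length (c :: t) = t by simp]
        rw [ih f ([n'].reverse ++ acc) (by omega)]
        simp
      · rw [if_neg (by simp [List.isPrefixOf, beq_iff_eq]; exact fun h => hc h.symm)]
        rw [ih f (c :: acc) (by simp at hf; omega)]
        simp [hc]

lemma replace_single (cs : List Char) (o n' : Char) :
    PySem.Chars.replace cs [o] [n'] = cs.map (fun c => if c = o then n' else c) := by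
  rw [PySem.Chars.replace]
  simp only [List.isEmpty_cons]
  rw [replace_go_single o n' cs cs.length [] (le_refl _)]
  simp

lemma sum2_last (xs : List Nat) : ∀ ys : List Nat,
    xs.getLast? ≠ some 0 → ys.getLast? ≠ some 0 → (sum2 xs ys).getLast? ≠ some 0 := by
  induction xs with
  | nil => intro ys _ hy; simpa [sum2] using hy
  | cons x xs ih =>
    intro ys hx hy
    cases ys with
    | nil => simpa [sum2] using hx
    | cons y ys =>
      simp only [sum2]
      cases xs with
      | nil =>
        cases ys with
        | nil => simp [sum2] at *; omega
        | cons y' ys' =>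
          simp only [sum2, List.getLast?_cons_cons] at *
          exact hy
      | cons x' xs' =>
        obtain ⟨z, zs, hzz⟩ : ∃ z zs, sum2 (x' :: xs') ys = z :: zs := by
          cases ys <;> exact ⟨_, _, rfl⟩
        rw [hzz, List.getLast?_cons_cons, ← hzz]
        apply ih
        · rwa [List.getLast?_cons_cons] at hx
        · cases ys with
          | nil => simp
          | cons y' ys' => rwa [List.getLast?_cons_cons] at hy

lemma sum2_lt_ten (xs : List Nat) : ∀ ys : List Nat, (∀ x ∈ xs, x < 2) → (∀ y ∈ ys, y < 2) →
    ∀ z ∈ sum2 xs ys, z < 10 := by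
  induction xs with
  | nil => intro ys _ hy z hz; have := hy z (by simpa [sum2] using hz); omega
  | cons x xs ih =>
    intro ys hx hy z hz
    cases ys with
    | nil =>
      have := hx z (by simpa [sum2] using hz); omega
    | cons y ys =>
      simp only [sum2, List.mem_cons] at hz
      rcases hz with rfl | hz
      · have h1 := hx x (by simp); have h2 := hy y (by simp); omega
      · exact ih ys (fun a ha => hx a (by simp [ha])) (fun a ha => hy a (by simp [ha])) z hz

lemma or2_lt_two (xs : List Nat) : ∀ ys : List Nat, (∀ x ∈ xs, x < 2) → (∀ y ∈ ys, y < 2) →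
    ∀ z ∈ or2 xs ys, z < 2 := by
  induction xs with
  | nil => intro ys _ hy z hz; exact hy z (by simpa [or2] using hz)
  | cons x xs ih =>
    intro ys hx hy z hz
    cases ys with
    | nil => exact hx z (by simpa [or2] using hz)
    | cons y ys =>
      simp only [or2, List.mem_cons] at hz
      rcases hz with rfl | hz
      · have h1 := hx x (by simp); have h2 := hy y (by simp)
        interval_cases x <;> interval_cases y <;> decide
      · exact ih ys (fun a ha => hx a (by simp [ha])) (fun a ha => hy a (by simp [ha])) z hz

lemma map_sum2_or2 (xs : List Nat) : ∀ ys : List Nat, (∀ x ∈ xs, x < 2) → (∀ y ∈ ys, y < 2) →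
    (sum2 xs ys).map (fun d => pvRepl d.digitChar) = (or2 xs ys).map (fun d => pvTranslate d.digitChar) := by
  have point : ∀ d : Nat, d < 2 → pvRepl d.digitChar = pvTranslate d.digitChar := by
    intro d hd; interval_cases d <;> decide
  induction xs with
  | nil =>
    intro ys _ hy
    simp only [sum2, or2]
    exact List.map_congr_left fun y hyy => point y (hy y hyy)
  | cons x xs ih =>
    intro ys hx hy
    cases ys with
    | nil =>
      simp only [sum2, or2]
      exact List.map_congr_left fun a ha => point a (hx a ha)
    | cons y ys =>
      simp only [sum2, or2, List.map_cons]
      congr 1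
      · have h1 := hx x (by simp); have h2 := hy y (by simp)
        interval_cases x <;> interval_cases y <;> decide
      · exact ih ys (fun a ha => hx a (by simp [ha])) (fun a ha => hy a (by simp [ha]))


lemma chain_eq (cs : List Char) :
    PySem.Chars.replace (PySem.Chars.replace (PySem.Chars.replace cs ['0'] [' ']) ['1'] ['#']) ['2'] ['#'] = cs.map pvRepl := by
  simp only [replace_single, List.map_map]
  refine List.map_congr_left fun c _ => ?_
  by_cases h0 : c = '0'
  · subst h0; decide
  by_cases h1 : c = '1'
  · subst h1; decide
  by_cases h2 : c = '2'
  · subst h2; decide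
  simp [Function.comp, h0, h1, h2, pvRepl]

lemma digits_getLast?_ne (m : Nat) : (Nat.digits 2 m).getLast? ≠ some 0 := by
  cases hm : Nat.digits 2 m with
  | nil => simp
  | cons d l =>
    have hne : Nat.digits 2 m ≠ [] := by simp [hm]
    have hm0 : m ≠ 0 := Nat.digits_ne_nil_iff_ne_zero.mp hne
    rw [← hm, List.getLast?_eq_getLast hne]
    intro h
    exact Nat.getLast_digit_ne_zero 2 hm0 (Option.some_inj.mp h)

lemma value_of_padded (a k : Nat) :
    pyIntOfDigits (List.replicate k '0' ++ Nat.toDigits 2 a) 0 = Nat.ofDigits 10 (Nat.digits 2 a) := by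
  rw [pyIntOfDigits_spec]
  simp only [Nat.zero_mul, Nat.zero_add, List.reverse_append, List.reverse_replicate,
    List.map_append, List.map_replicate, zero_mul, zero_add]
  rw [show charDigit '0' = 0 from rfl, ofDigits_append_zeros]
  rw [toDigits_eq 2 (by norm_num)]
  by_cases ha : a = 0
  · subst ha; simp [charDigit, Nat.ofDigits]
  · rw [if_neg ha]
    rw [List.reverse_reverse, List.map_map]
    congr 1
    refine (List.map_congr_left ?_).trans (List.map_id _)
    intro d hd
    exact charDigit_digitChar d (lt_of_lt_of_le (Nat.digits_lt_base (by norm_num) hd) (by norm_num))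

lemma row_eq (n i j : Int) (hi : 0 ≤ i) (hj : 0 ≤ j) :
    solutionRow n i j = solutionAltRow n (i, j) := by
  obtain ⟨a, rfl⟩ := Int.eq_ofNat_of_zero_le hi
  obtain ⟨b, rfl⟩ := Int.eq_ofNat_of_zero_le hj
  have hbin : ∀ m : Nat, (PySem.Int.toBinChars0b (m : Int)).drop 2 = Nat.toDigits 2 m := by
    intro m
    simp [PySem.Int.toBinChars0b, show ¬((m : Int) < 0) from not_lt.mpr (Int.natCast_nonneg m)]
  have htc : ∀ m : Nat, PySem.Int.toChars ((m : Nat) : Int) = Nat.toDigits 10 m := by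
    intro m
    simp [PySem.Int.toChars, show ¬((m : Int) < 0) from not_lt.mpr (Int.natCast_nonneg m)]
  simp only [solutionRow, solutionAltRow, hbin, PySem.Int.bor_natCast]
  have hval : ∀ (m : Nat),
      pyIntOfDigits (if n > ((Nat.toDigits 2 m).length : Int) then
          List.replicate ((n : Int) - ((Nat.toDigits 2 m).length : Int)).toNat '0' ++ Nat.toDigits 2 m
        else Nat.toDigits 2 m) 0 = Nat.ofDigits 10 (Nat.digits 2 m) := by
    intro m; split
    · exact value_of_padded m _
    · simpa using value_of_padded m 0
  rw [hval a, hval b]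
  rw [show ((Nat.ofDigits 10 (Nat.digits 2 a) : Nat) : Int) + ((Nat.ofDigits 10 (Nat.digits 2 b) : Nat) : Int)
        = (((Nat.ofDigits 10 (sum2 (Nat.digits 2 a) (Nat.digits 2 b)) : Nat)) : Int) by
      rw [ofDigits_sum2]; push_cast; ring]
  rw [htc, chain_eq]
  by_cases hz : a = 0 ∧ b = 0
  · obtain ⟨rfl, rfl⟩ := hz
    rw [show Nat.toDigits 10 (Nat.ofDigits 10 (sum2 (Nat.digits 2 0) (Nat.digits 2 0))) = ['0'] from by decide]
    rw [show Nat.toDigits 2 (0 ||| 0) = ['0'] from by decide]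
    simp only [PySem.Chars.zfill]
    rw [if_neg (by decide : ¬('0' = '+' ∨ '0' = '-'))]
    by_cases hn : n ≤ ((['0'] : List Char).length : Int)
    · rw [if_pos hn, if_neg (by simpa using hn)]
      decide
    · rw [if_neg hn, if_pos (by simpa using hn)]
      simp only [List.length_cons, List.length_nil] at hn ⊢
      rw [show ((n : Int) - (0 + 1 : Nat)).toNat = n.toNat - (0 + 1) by omega]
      simp only [List.map_append, List.map_replicate]
      rfl
  · have hda : ∀ d ∈ Nat.digits 2 a, d < 2 := fun d hd => Nat.digits_lt_base (by norm_num) hd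
    have hdb : ∀ d ∈ Nat.digits 2 b, d < 2 := fun d hd => Nat.digits_lt_base (by norm_num) hd
    set S := sum2 (Nat.digits 2 a) (Nat.digits 2 b) with hSdef
    have hSne : S ≠ [] := by
      intro hnil
      have hlen := length_sum2 (Nat.digits 2 a) (Nat.digits 2 b)
      rw [← hSdef, hnil] at hlen
      simp only [List.length_nil] at hlen
      have h1 : (Nat.digits 2 a).length = 0 := by omega
      have h2 : (Nat.digits 2 b).length = 0 := by omega
      exact hz ⟨Nat.digits_eq_nil_iff_eq_zero.mp (List.length_eq_zero_iff.mp h1),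
                Nat.digits_eq_nil_iff_eq_zero.mp (List.length_eq_zero_iff.mp h2)⟩
    have hlast : ∀ h : S ≠ [], S.getLast h ≠ 0 := by
      intro h hcon
      have hgl := sum2_last (Nat.digits 2 a) (Nat.digits 2 b) (digits_getLast?_ne a) (digits_getLast?_ne b)
      rw [← hSdef] at hgl
      exact hgl (by rw [List.getLast?_eq_getLast h, hcon])
    have hdig10 : Nat.digits 10 (Nat.ofDigits 10 S) = S :=
      Nat.digits_ofDigits 10 (by norm_num) S (hSdef ▸ sum2_lt_ten _ _ hda hdb) hlast
    have hvz : Nat.ofDigits 10 S ≠ 0 := by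
      intro h0
      rw [h0] at hdig10
      simp only [Nat.digits_zero] at hdig10
      exact hSne hdig10.symm
    have horn : a ||| b ≠ 0 := by
      intro h
      exact hz ⟨Nat.le_zero.mp (h ▸ Nat.left_le_or), Nat.le_zero.mp (h ▸ Nat.right_le_or)⟩
    rw [toDigits_eq 10 (by norm_num), if_neg hvz, hdig10,
        toDigits_eq 2 one_lt_two, if_neg horn, digits_or]
    have hc2 : ∀ x ∈ or2 (Nat.digits 2 a) (Nat.digits 2 b), x < 2 := or2_lt_two _ _ hda hdb
    have hlenO : (((or2 (Nat.digits 2 a) (Nat.digits 2 b)).map Nat.digitChar).reverse).length = S.length := by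
      simp [length_or2, hSdef, length_sum2]
    obtain ⟨c, t, hct⟩ : ∃ c t, ((or2 (Nat.digits 2 a) (Nat.digits 2 b)).map Nat.digitChar).reverse = c :: t := by
      cases hO : ((or2 (Nat.digits 2 a) (Nat.digits 2 b)).map Nat.digitChar).reverse with
      | nil =>
        exfalso
        rw [hO] at hlenO
        exact hSne (List.length_eq_zero_iff.mp hlenO.symm)
      | cons c t => exact ⟨c, t, rfl⟩
    have hcsign : ¬(c = '+' ∨ c = '-') := by
      have hcmem : c ∈ ((or2 (Nat.digits 2 a) (Nat.digits 2 b)).map Nat.digitChar).reverse := by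
        rw [hct]; exact List.mem_cons_self
      rw [List.mem_reverse] at hcmem
      obtain ⟨d, hd, rfl⟩ := List.mem_map.mp hcmem
      exact digitChar_ne_sign d (by have := hc2 d hd; omega)
    have hmapeq : (S.map Nat.digitChar).reverse.map pvRepl =
        (((or2 (Nat.digits 2 a) (Nat.digits 2 b)).map Nat.digitChar).reverse).map pvTranslate := by
      simp only [List.map_reverse, List.map_map]
      exact congrArg List.reverse (hSdef ▸ map_sum2_or2 (Nat.digits 2 a) (Nat.digits 2 b) hda hdb)
    have hsl : ((S.map Nat.digitChar).reverse).length = S.length := by simp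
    have hctl : (c :: t).length = S.length := by rw [← hct, hlenO]
    rw [hct]
    simp only [PySem.Chars.zfill]
    rw [if_neg hcsign]
    by_cases hcond : n ≤ ((c :: t).length : Int)
    · rw [if_pos hcond, if_neg (by rw [hsl]; rw [hctl] at hcond; omega)]
      rw [← hct, hmapeq]
    · rw [if_neg hcond, if_pos (by rw [hsl]; rw [hctl] at hcond; omega)]
      have hKK : ((n : Int) - (((S.map Nat.digitChar).reverse).length : Int)).toNat
          = n.toNat - (c :: t).length := by
        rw [hsl, hctl]; rw [hctl] at hcond; omega
      simp only [List.map_append, List.map_replicate]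
      rw [show pvRepl '0' = ' ' from rfl, show pvTranslate '0' = ' ' from rfl, hKK, ← hct, hmapeq]



-- ===== VERDICT (by name: the statement is the Claim_ definition above) =====
theorem solution_spec : Claim_equal_solution := by
  intro n arr1 arr2 _ hpre
  unfold Spec_solution solution solution_alt
  rw [PySem.List.foldl_append_singleton_eq_map]
  exact List.map_congr_left fun p hp => row_eq n p.1 p.2 (hpre p hp).1 (hpre p hp).2
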